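-- pv_equiv track=rewrite | github.com/Brunokrk/lfa_udesc | pt1/transition.py | init_matriz
-- ===== SOURCE A (Python) =====
-- def init_matriz(all_states, alfabeto):
--     """ (str,str) -> matriz onde a primeira linha é o alfabeto
--     e a primeira coluna são os estados finais """
--     it = 0
--     jt = 0
--     matriz = []
--     for i in range(0, (len(all_states)+1)):
--         linha = []
--         for j in range(0, (len(alfabeto)+1)):
--             if (j == 0 and i != 0):
--                 linha.append(all_states[it])
--                 it = it+1
--             elif(i == 0 and j != 0):
--                 linha.append(alfabeto[jt])
--                 jt = jt+1
--             else:
--                 linha.append('-')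
--         matriz.append(linha)
--
--     return matriz
-- ===== SOURCE B (Python) =====
-- def init_matriz(all_states, alfabeto):
--     """ (str,str) -> matriz onde a primeira linha é o alfabeto
--     e a primeira coluna são os estados finais """
--     n = len(all_states)
--     cols = [['-'] + list(all_states)]
--     for a in alfabeto:
--         cols.append([a] + ['-'] * n)
--     return [list(row) for row in zip(*cols)]
-- ===== Notes on version B (the rewrite author's own statement) =====
-- stated objective: alternative
-- what changed: Builds the matrix transposed, column by column (first column '-'+states, then one column symbol+dashes per alphabet letter), and obtains the row matrix by a zip(*cols) transpose, instead of A's cell-by-cell nested row loop with it/jt counters.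
import Mathlib
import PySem

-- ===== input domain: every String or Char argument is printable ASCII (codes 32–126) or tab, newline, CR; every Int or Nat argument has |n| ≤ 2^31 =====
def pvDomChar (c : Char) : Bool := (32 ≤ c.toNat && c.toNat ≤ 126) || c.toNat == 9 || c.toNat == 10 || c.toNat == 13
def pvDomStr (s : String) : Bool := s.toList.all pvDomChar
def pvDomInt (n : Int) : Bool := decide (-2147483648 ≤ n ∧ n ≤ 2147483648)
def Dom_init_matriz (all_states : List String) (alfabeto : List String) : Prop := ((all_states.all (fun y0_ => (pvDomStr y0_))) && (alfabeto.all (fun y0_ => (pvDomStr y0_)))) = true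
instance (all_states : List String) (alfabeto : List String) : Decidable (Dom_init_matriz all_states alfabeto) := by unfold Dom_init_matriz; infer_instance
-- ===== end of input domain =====

-- B builds the matrix transposed (one column per alphabet symbol, after a '-'+states column)
-- and transposes it with zip(*cols): an alternative, column-wise construction, same result.


-- ===== PORT A =====
-- body of A's inner 'for j in range(0, len(alfabeto)+1)' loop; state = (it, jt, linha).
-- all_states[it] / alfabeto[jt] are always in range when A runs (it < i ≤ len(all_states),
-- jt < j ≤ len(alfabeto)), so pyGetD with a dummy default is exact: no IndexError is reachable
def initMatrizCell (all_states : List String) (alfabeto : List String) (i : Int)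
    (st : Int × Int × List String) (j : Int) : Int × Int × List String :=
  let (it, jt, linha) := st
  if j == 0 && i != 0 then (it + 1, jt, linha ++ [PySem.List.pyGetD all_states it ""])
  else if i == 0 && j != 0 then (it, jt + 1, linha ++ [PySem.List.pyGetD alfabeto jt ""])
  else (it, jt, linha ++ ["-"])

-- body of A's outer 'for i in range(0, len(all_states)+1)' loop; state = (it, jt, matriz)
def initMatrizRowStep (all_states : List String) (alfabeto : List String)
    (st : Int × Int × List (List String)) (i : Int) : Int × Int × List (List String) :=
  let (it, jt, matriz) := st
  let inner :=
    (PySem.List.pyRange 0 ((alfabeto.length : Int) + 1)).foldl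
      (initMatrizCell all_states alfabeto i) (it, jt, [])
  (inner.1, inner.2.1, matriz ++ [inner.2.2])

def init_matriz (all_states : List String) (alfabeto : List String) : List (List String) :=
  ((PySem.List.pyRange 0 ((all_states.length : Int) + 1)).foldl
      (initMatrizRowStep all_states alfabeto) (0, 0, [])).2.2

-- ===== PORT B =====
-- one step of Python's zip: the next element of every column, and the columns' remainders
-- (none exactly when some column is exhausted — zip stops there)
def zipHeadsTails : List (List String) → Option (List String × List (List String))
  | [] => some ([], [])
  | [] :: _ => none
  | (h :: t) :: rest => (zipHeadsTails rest).map (fun p => (h :: p.1, t :: p.2))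

-- zip(*(c :: rest)) driven structurally by the first column c (zip stops at the shortest column)
def zipGo : List String → List (List String) → List (List String)
  | [], _ => []
  | h :: t, rest =>
      match zipHeadsTails rest with
      | none => []
      | some (hs, ts) => (h :: hs) :: zipGo t ts

-- zip(*cols) as used in Source B's final comprehension
def pyZipCols : List (List String) → List (List String)
  | [] => []
  | c :: rest => zipGo c rest

def init_matriz_alt (all_states : List String) (alfabeto : List String) : List (List String) :=
  let n := all_states.length
  let cols := (["-"] ++ all_states) :: alfabeto.map (fun a => [a] ++ List.replicate n "-")
  pyZipCols cols

-- ===== PRECONDITION & SPEC =====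
def Spec_init_matriz (all_states : List String) (alfabeto : List String) (out : List (List String)) : Prop := out = init_matriz_alt all_states alfabeto
instance (all_states : List String) (alfabeto : List String) (out : List (List String)) : Decidable (Spec_init_matriz all_states alfabeto out) := by unfold Spec_init_matriz; infer_instance

-- ===== CLAIM (what is proved, stated in full; the proofs are below) =====
def Claim_equal_init_matriz : Prop := ∀ (all_states : List String) (alfabeto : List String), Dom_init_matriz all_states alfabeto → Spec_init_matriz all_states alfabeto (init_matriz all_states alfabeto)

-- ===== LEMMAS AND PROOFS =====

-- ---- A-side characterisation (A = header row :: one row per state) ----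

-- within a row i ≠ 0, every j ≠ 0 takes the third branch: append '-'
theorem initMatriz_dashScan (all_states alfabeto : List String) (i : Int) (hi : i ≠ 0)
    (r : List Int) (hr : ∀ j ∈ r, j ≠ 0) :
    ∀ (it jt : Int) (L : List String),
      r.foldl (initMatrizCell all_states alfabeto i) (it, jt, L)
        = (it, jt, L ++ List.replicate r.length "-") := by
  induction r with
  | nil => intro it jt L; simp
  | cons j r ih =>
      intro it jt L
      have hj : j ≠ 0 := hr j (by simp)
      simp only [List.foldl_cons, initMatrizCell]
      rw [if_neg (by simp [hj]), if_neg (by simp [hi])]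
      rw [ih (fun x hx => hr x (by simp [hx])) it jt (L ++ ["-"])]
      simp [List.replicate_succ]

-- within row 0, every j ≠ 0 takes the second branch: append alfabeto[jt], jt += 1
theorem initMatriz_headerScan (all_states alfabeto : List String) (r : List Int)
    (hr : ∀ j ∈ r, j ≠ 0) :
    ∀ (k : Nat) (it : Int) (L : List String),
      r.length = alfabeto.length - k → k ≤ alfabeto.length →
      r.foldl (initMatrizCell all_states alfabeto 0) (it, (k : Int), L)
        = (it, (alfabeto.length : Int), L ++ alfabeto.drop k) := by
  induction r with
  | nil =>
      intro k it L hlen hk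
      have : k = alfabeto.length := by simp at hlen; omega
      simp [this]
  | cons j r ih =>
      intro k it L hlen hk
      have hj : j ≠ 0 := hr j (by simp)
      have hklt : k < alfabeto.length := by simp at hlen; omega
      simp only [List.foldl_cons, initMatrizCell]
      rw [if_neg (by simp), if_pos (by simpa using hj)]
      rw [PySem.List.pyGetD_natCast]
      rw [show (k : Int) + 1 = ((k + 1 : Nat) : Int) by push_cast; ring]
      rw [ih (fun x hx => hr x (by simp [hx])) (k + 1) it (L ++ [alfabeto.getD k ""])
        (by simp at hlen ⊢; omega) (by omega)]
      rw [List.getD_eq_getElem _ _ hklt]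
      simp [List.append_assoc, List.getElem_cons_drop hklt]

-- the first outer iteration (i = 0) builds the header row
theorem initMatriz_step0 (all_states alfabeto : List String) :
    initMatrizRowStep all_states alfabeto (0, 0, []) 0
      = (0, (alfabeto.length : Int), [["-"] ++ alfabeto]) := by
  simp only [initMatrizRowStep]
  rw [PySem.List.pyRange_one_cons (a := 0) (by positivity), List.foldl_cons]
  rw [show initMatrizCell all_states alfabeto 0 (0, 0, []) 0 = (0, 0, ["-"]) from rfl]
  rw [show ((0 : Int), (0 : Int), (["-"] : List String)) = (0, ((0 : Nat) : Int), ["-"]) by norm_num]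
  rw [initMatriz_headerScan all_states alfabeto _
    (fun j hj => by have := (PySem.List.mem_pyRange_one).mp hj; omega) 0 0 ["-"]
    (by rw [PySem.List.length_pyRange_one]; omega) (by omega)]
  simp

-- an outer iteration with i ≠ 0 and it = k < len(all_states) appends one body row
theorem initMatriz_stepRow (all_states alfabeto : List String) (i : Int) (hi : i ≠ 0)
    (k : Nat) (hk : k < all_states.length) (jt : Int) (M : List (List String)) :
    initMatrizRowStep all_states alfabeto ((k : Int), jt, M) i
      = ((k : Int) + 1, jt, M ++ [[all_states[k]] ++ List.replicate alfabeto.length "-"]) := by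
  simp only [initMatrizRowStep]
  rw [PySem.List.pyRange_one_cons (a := 0) (by positivity), List.foldl_cons]
  simp only [initMatrizCell]
  rw [if_pos (by simp [hi]), PySem.List.pyGetD_natCast]
  rw [initMatriz_dashScan all_states alfabeto i hi _
    (fun j hj => by have := (PySem.List.mem_pyRange_one).mp hj; omega)]
  rw [PySem.List.length_pyRange_one]
  rw [List.getD_eq_getElem _ _ hk]
  simp

-- the outer loop over range(1, n+1): one body row per remaining state
theorem initMatriz_outerScan (all_states alfabeto : List String) (r : List Int)
    (hr : ∀ i ∈ r, i ≠ 0) :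
    ∀ (k : Nat) (jt : Int) (M : List (List String)),
      r.length = all_states.length - k → k ≤ all_states.length →
      r.foldl (initMatrizRowStep all_states alfabeto) ((k : Int), jt, M)
        = ((all_states.length : Int), jt,
            M ++ (all_states.drop k).map
              (fun s => [s] ++ List.replicate alfabeto.length "-")) := by
  induction r with
  | nil =>
      intro k jt M hlen hk
      have : k = all_states.length := by simp at hlen; omega
      simp [this]
  | cons i r ih =>
      intro k jt M hlen hk
      have hi : i ≠ 0 := hr i (by simp)
      have hklt : k < all_states.length := by simp at hlen; omega
      simp only [List.foldl_cons]
      rw [initMatriz_stepRow all_states alfabeto i hi k hklt jt M]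
      rw [show (k : Int) + 1 = ((k + 1 : Nat) : Int) by push_cast; ring]
      rw [ih (fun x hx => hr x (by simp [hx])) (k + 1) jt _
        (by simp at hlen ⊢; omega) (by omega)]
      have hmap : List.drop k (all_states.map (fun s => [s] ++ List.replicate alfabeto.length "-"))
          = ([all_states[k]] ++ List.replicate alfabeto.length "-")
              :: List.drop (k + 1) (all_states.map (fun s => [s] ++ List.replicate alfabeto.length "-")) := by
        rw [← List.getElem_cons_drop (by simpa using hklt)]
        simp
      rw [← List.map_drop, ← List.map_drop] at hmap
      rw [hmap]
      simp

-- A's result in closed form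
theorem initMatriz_eq (all_states alfabeto : List String) :
    init_matriz all_states alfabeto
      = (["-"] ++ alfabeto) :: all_states.map (fun s => [s] ++ List.replicate alfabeto.length "-") := by
  unfold init_matriz
  rw [PySem.List.pyRange_one_cons (a := 0) (b := (all_states.length : Int) + 1) (by positivity)]
  rw [List.foldl_cons, initMatriz_step0]
  have h := initMatriz_outerScan all_states alfabeto
    (PySem.List.pyRange (0 + 1) ((all_states.length : Int) + 1))
    (fun i hi => by have := (PySem.List.mem_pyRange_one).mp hi; omega)
    0 (alfabeto.length : Int) [["-"] ++ alfabeto]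
    (by rw [PySem.List.length_pyRange_one]; omega) (by omega)
  simp only [Nat.cast_zero] at h
  rw [h]
  simp

-- ---- B-side characterisation (the transpose unfolds to the same rows) ----

-- one zip step over columns that each still hold head f a and tail g a
theorem zipHeadsTails_map {α : Type} (l : List α) (f : α → String) (g : α → List String) :
    zipHeadsTails (l.map (fun a => f a :: g a)) = some (l.map f, l.map g) := by
  induction l with
  | nil => rfl
  | cons a l ih => simp [zipHeadsTails, ih]

-- phase 2: all remaining columns are pure dash columns of the first column's length
theorem zipGo_dashPhase (alfabeto : List String) :
    ∀ (ss : List String),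
      zipGo ss (alfabeto.map (fun _ => List.replicate ss.length "-"))
        = ss.map (fun s => [s] ++ List.replicate alfabeto.length "-") := by
  intro ss
  induction ss with
  | nil => rfl
  | cons s ss ih =>
      have h := zipHeadsTails_map alfabeto (fun _ => "-")
        (fun _ => List.replicate ss.length "-")
      simp only [List.length_cons, List.replicate_succ]
      rw [zipGo, h]
      simp only []
      rw [ih]
      simp [List.map_const']

-- B's result in the same closed form
theorem initMatrizAlt_eq (all_states alfabeto : List String) :
    init_matriz_alt all_states alfabeto
      = (["-"] ++ alfabeto) :: all_states.map (fun s => [s] ++ List.replicate alfabeto.length "-") := by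
  unfold init_matriz_alt pyZipCols
  simp only []
  rw [show (["-"] ++ all_states : List String) = "-" :: all_states from rfl]
  rw [zipGo]
  have h := zipHeadsTails_map alfabeto (fun a => a) (fun _ => List.replicate all_states.length "-")
  simp only [List.map_id'] at h
  rw [show (alfabeto.map fun a => [a] ++ List.replicate all_states.length "-")
        = alfabeto.map (fun a => a :: List.replicate all_states.length "-") from rfl]
  rw [h]
  show ("-" :: alfabeto) :: zipGo all_states (alfabeto.map fun _ => List.replicate all_states.length "-")
      = (["-"] ++ alfabeto) :: all_states.map (fun s => [s] ++ List.replicate alfabeto.length "-")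
  rw [zipGo_dashPhase alfabeto all_states]
  rfl

-- ===== VERDICT (by name: the statement is the Claim_ definition above) =====
theorem init_matriz_spec : Claim_equal_init_matriz := by
  intro all_states alfabeto _
  show init_matriz all_states alfabeto = init_matriz_alt all_states alfabeto
  rw [initMatriz_eq, initMatrizAlt_eq]
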